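-- pv_equiv track=rewrite | github.com/SWORDIntel/WIFUCKER | crackers/mutation_engine.py | _apply_single_rule
-- ===== SOURCE A (Python) =====
-- def _apply_single_rule(word: str, rule: str) -> str:
--     """Apply a single rule to a word"""
--     result = word
--
--     i = 0
--     while i < len(rule):
--         char = rule[i]
--
--         if char == ':':
--             pass  # no-op
--         elif char == 'l':
--             result = result.lower()
--         elif char == 'u':
--             result = result.upper()
--         elif char == 'c':
--             result = result.capitalize()
--         elif char == 'r':
--             result = result[::-1]
--         elif char == '$':
--             if i + 1 < len(rule):
--                 result = result + rule[i + 1]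
--                 i += 1
--         elif char == '^':
--             if i + 1 < len(rule):
--                 result = rule[i + 1] + result
--                 i += 1
--
--         i += 1
--
--     return result
-- ===== SOURCE B (Python) =====
-- def _apply_single_rule(word: str, rule: str) -> str:
--     """Tokenize the rule once, then fold the token list over the word."""
--     tokens = []
--     i = 0
--     n = len(rule)
--     while i < n:
--         ch = rule[i]
--         if ch in 'lucr':
--             tokens.append((ch, None))
--             i += 1
--         elif ch in '$^':
--             if i + 1 < n:
--                 tokens.append((ch, rule[i + 1]))
--                 i += 2
--             else:
--                 i += 1  # trailing $/^ with no argument: dropped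
--         else:
--             i += 1  # ':' and unknown directives are no-ops
--     result = word
--     for op, arg in tokens:
--         if op == 'l':
--             result = result.lower()
--         elif op == 'u':
--             result = result.upper()
--         elif op == 'c':
--             result = result.capitalize()
--         elif op == 'r':
--             result = result[::-1]
--         elif op == '$':
--             result = result + arg
--         else:
--             result = arg + result
--     return result
-- ===== Notes on version B (the rewrite author's own statement) =====
-- stated objective: alternative
-- what changed: B splits A's single index-driven while loop into a tokenizer pass that compiles the rule into an operation list (consuming two chars for $/^ and dropping argument-less trailing ones) followed by a fold applying the operations to the word.
import Mathlib
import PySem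

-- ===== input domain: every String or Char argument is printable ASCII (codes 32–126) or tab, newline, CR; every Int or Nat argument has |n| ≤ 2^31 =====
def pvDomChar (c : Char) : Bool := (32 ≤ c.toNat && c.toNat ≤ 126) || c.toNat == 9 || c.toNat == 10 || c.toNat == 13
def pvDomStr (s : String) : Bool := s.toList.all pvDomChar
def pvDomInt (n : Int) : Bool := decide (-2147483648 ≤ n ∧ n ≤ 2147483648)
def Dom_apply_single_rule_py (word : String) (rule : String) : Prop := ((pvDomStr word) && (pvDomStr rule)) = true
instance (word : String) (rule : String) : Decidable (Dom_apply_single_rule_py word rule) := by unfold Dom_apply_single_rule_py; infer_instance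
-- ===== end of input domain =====

-- B replaces A's index-driven while loop with a rule tokenizer plus a fold applying the tokens; same cost (objective: alternative).


-- ===== PORT A =====
-- str.capitalize: first char uppercased, the rest lowercased (exact on the ASCII domain)
def pyCapitalize (cs : List Char) : List Char :=
  match cs with
  | [] => []
  | c :: rest => PySem.Chars.upperChar c :: rest.map PySem.Chars.lowerChar

-- A's while loop over the rule characters; the index advance 'i += 1' inside '$'/'^'
-- becomes consuming the next list element (s[::-1] is List.reverse on code points).
def aLoop (rule : List Char) (result : List Char) : List Char :=
  match rule with
  | [] => result
  | c :: rest =>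
    if c = ':' then aLoop rest result
    else if c = 'l' then aLoop rest (PySem.Chars.lower result)
    else if c = 'u' then aLoop rest (PySem.Chars.upper result)
    else if c = 'c' then aLoop rest (pyCapitalize result)
    else if c = 'r' then aLoop rest result.reverse
    else if c = '$' then
      match rest with
      | d :: rest' => aLoop rest' (result ++ [d])
      | [] => aLoop [] result
    else if c = '^' then
      match rest with
      | d :: rest' => aLoop rest' (d :: result)
      | [] => aLoop [] result
    else aLoop rest result

def apply_single_rule_py (word : String) (rule : String) : String :=
  String.ofList (aLoop rule.toList word.toList)

-- ===== PORT B =====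
inductive MutTok where
  | low | up | cap | rev
  | app : Char → MutTok
  | pre : Char → MutTok
  deriving DecidableEq, Repr

-- pass 1: compile the rule into a token list ($/^ take the next char; a trailing one is dropped)
def tokenize (rule : List Char) : List MutTok :=
  match rule with
  | [] => []
  | c :: rest =>
    if c = 'l' then .low :: tokenize rest
    else if c = 'u' then .up :: tokenize rest
    else if c = 'c' then .cap :: tokenize rest
    else if c = 'r' then .rev :: tokenize rest
    else if c = '$' then
      match rest with
      | d :: rest' => .app d :: tokenize rest'
      | [] => []
    else if c = '^' then
      match rest with
      | d :: rest' => .pre d :: tokenize rest'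
      | [] => []
    else tokenize rest

-- pass 2: one token application
def applyTok (cs : List Char) : MutTok → List Char
  | .low => PySem.Chars.lower cs
  | .up => PySem.Chars.upper cs
  | .cap => pyCapitalize cs
  | .rev => cs.reverse
  | .app d => cs ++ [d]
  | .pre d => d :: cs

def apply_single_rule_py_alt (word : String) (rule : String) : String :=
  String.ofList ((tokenize rule.toList).foldl applyTok word.toList)

-- ===== PRECONDITION & SPEC =====
def Spec_apply_single_rule_py (word : String) (rule : String) (out : String) : Prop := out = apply_single_rule_py_alt word rule
instance (word : String) (rule : String) (out : String) : Decidable (Spec_apply_single_rule_py word rule out) := by unfold Spec_apply_single_rule_py; infer_instance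

-- ===== CLAIM (what is proved, stated in full; the proofs are below) =====
def Claim_equal_apply_single_rule_py : Prop := ∀ (word : String) (rule : String), Dom_apply_single_rule_py word rule → Spec_apply_single_rule_py word rule (apply_single_rule_py word rule)

-- ===== LEMMAS AND PROOFS =====
theorem aLoop_eq_foldl_tokenize (rule : List Char) (result : List Char) :
    aLoop rule result = (tokenize rule).foldl applyTok result := by
  fun_induction aLoop rule result <;> rw [tokenize.eq_def] <;> simp_all [applyTok, tokenize]

-- ===== VERDICT (by name: the statement is the Claim_ definition above) =====
theorem apply_single_rule_py_spec : Claim_equal_apply_single_rule_py := by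
  intro word rule _
  unfold Spec_apply_single_rule_py apply_single_rule_py apply_single_rule_py_alt
  rw [aLoop_eq_foldl_tokenize]
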